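-- pv_equiv track=rewrite | github.com/JeetInTech/NLP | hashtag_segmentation.py | segment_string
-- ===== SOURCE A (Python) =====
-- def is_valid_token(token, word_set):
--     return token in word_set
--
-- def segment_string(s, word_set, memo):
--     if s in memo:
--         return memo[s]
--     if not s:
--         return []
--
--     best_split = None
--     for i in range(1, len(s) + 1):
--         left = s[:i]
--         if is_valid_token(left, word_set):
--             right_split = segment_string(s[i:], word_set, memo)
--             if right_split is not None:
--                 current_split = [left] + right_split
--                 if best_split is None or len(current_split) > len(best_split):
--                     best_split = current_split
--
--     memo[s] = best_split if best_split is not None else [s]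
--     return memo[s]
-- ===== SOURCE B (Python) =====
-- # B: iterative bottom-up DP over suffix start positions (count + split pointer), one
-- # reconstruction pass at the end; no recursion and no memo mutation (A mutates its
-- # memo argument in place; equivalence is about the RETURN value only).
-- def segment_string(s, word_set, memo):
--     n = len(s)
--     # dp[i] describes the result for suffix s[i:]:
--     #   (count, 'memo', v)  -> the pre-seeded memo value v
--     #   (0, 'empty', None)  -> empty suffix, []
--     #   (1, 'fall', None)   -> no valid split, [s[i:]]
--     #   (c, 'split', L)     -> best split: token s[i:i+L] then continue at i+L
--     dp = [None] * (n + 1)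
--     maxlen = max(map(len, word_set), default=0)  # no token longer than this can be valid
--     for i in range(n, -1, -1):
--         suf = s[i:]
--         if suf in memo:
--             v = memo[suf]
--             dp[i] = (len(v), 'memo', v)
--             continue
--         if i == n:
--             dp[i] = (0, 'empty', None)
--             continue
--         best = None  # (count, split_length), first strict maximum wins
--         m = n - i
--         for L in range(1, min(m, maxlen) + 1):
--             if suf[:L] in word_set:
--                 c = 1 + dp[i + L][0]
--                 if best is None or c > best[0]:
--                     best = (c, L)
--         dp[i] = (best[0], 'split', best[1]) if best is not None else (1, 'fall', None)
--     # reconstruction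
--     out = []
--     i = 0
--     while True:
--         _, kind, payload = dp[i]
--         if kind == 'memo':
--             out.extend(payload)
--             break
--         if kind == 'empty':
--             break
--         if kind == 'fall':
--             out.append(s[i:])
--             break
--         out.append(s[i:i + payload])
--         i += payload
--     return out
-- ===== Notes on version B (the rewrite author's own statement) =====
-- stated objective: faster
-- what changed: Replaced A's memoized top-down recursion that builds and compares whole candidate token lists at every suffix by an iterative bottom-up DP over suffix start positions that stores only a token count and a split pointer per position (inner scan capped at the longest word in word_set) with a single reconstruction pass at the end; B does not mutate the memo argument (return value is identical).
import Mathlib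
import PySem

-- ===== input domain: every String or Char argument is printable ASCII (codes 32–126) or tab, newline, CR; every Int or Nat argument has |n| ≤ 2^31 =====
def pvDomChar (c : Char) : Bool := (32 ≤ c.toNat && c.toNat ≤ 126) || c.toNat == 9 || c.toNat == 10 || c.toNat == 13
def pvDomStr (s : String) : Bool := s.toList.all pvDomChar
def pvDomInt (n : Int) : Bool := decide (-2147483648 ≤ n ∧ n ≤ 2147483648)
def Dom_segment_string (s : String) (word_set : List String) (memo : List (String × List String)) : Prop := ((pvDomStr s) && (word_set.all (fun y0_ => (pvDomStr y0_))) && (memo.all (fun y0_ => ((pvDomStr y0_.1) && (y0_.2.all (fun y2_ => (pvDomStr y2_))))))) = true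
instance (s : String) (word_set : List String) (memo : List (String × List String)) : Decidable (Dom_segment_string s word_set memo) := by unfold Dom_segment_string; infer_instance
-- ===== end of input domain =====

-- B replaces A's memoized recursion (which builds whole candidate lists per suffix) by a
-- bottom-up count+pointer DP with a single reconstruction pass (objective: faster).
-- A mutates its `memo` argument in place; B does not: the equivalence proved here is
-- about the RETURN value only.

-- ===== PORT A =====
-- strings are handled as List Char (PySem convention); the memo dict is an assoc list
-- with first-match lookup, new keys appended (A only ever writes keys that are absent).
def pvLookA : List (List Char × List String) → List Char → Option (List String)
  | [], _ => none
  | (k, v) :: r, t => if k = t then some v else pvLookA r t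

-- fuel = len(s) at top level; each recursive call is on a strict suffix of a nonempty
-- string, so the fuel-0 branch is unreachable.
def pvSegA (ws : List (List Char)) (fuel : Nat) (t : List Char)
    (m : List (List Char × List String)) : List String × List (List Char × List String) :=
  match pvLookA m t with
  | some v => (v, m)                                   -- if s in memo: return memo[s]
  | none =>
    if t = [] then ([], m)                             -- if not s: return []
    else
      match fuel with
      | 0 => ([], m)                                   -- unreachable
      | fuel' + 1 =>
        -- for i in range(1, len(s)+1): …  (right_split is never None in Python: the
        -- function always returns a list, so the `is not None` test is dropped)
        let st := (PySem.List.pyRange 1 ((t.length : Int) + 1) 1).foldl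
          (fun (st : Option (List String) × List (List Char × List String)) i =>
            let left := PySem.List.slice t none (some i)
            if left ∈ ws then                          -- is_valid_token(left, word_set)
              let r := pvSegA ws fuel' (PySem.List.slice t (some i) none) st.2
              let cur := String.ofList left :: r.1
              (match st.1 with
               | none => some cur
               | some b => if cur.length > b.length then some cur else some b, r.2)
            else st)
          (none, m)
        let res := match st.1 with | some b => b | none => [String.ofList t]
        (res, st.2 ++ [(t, res)])                      -- memo[s] = …; return memo[s]

def segment_string (s : String) (word_set : List String) (memo : List (String × List String)) : List String :=
  (pvSegA (word_set.map String.toList) s.toList.length s.toList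
    (memo.map (fun p => (p.1.toList, p.2)))).1

-- ===== PORT B =====
-- dp entry kinds of Source B; splitE stores the split length MINUS 1 (Source B stores the
-- length itself) so that the reconstruction's jump is structurally positive.
inductive PVEntry where
  | memoE : List String → PVEntry
  | emptyE : PVEntry
  | fallE : PVEntry
  | splitE : Nat → PVEntry
deriving Repr, DecidableEq

-- Source B's dp array, built back-to-front: pvBuildB … t is [dp[i], dp[i+1], …, dp[n]]
-- for the suffix t = s[i:]; Source B's absolute index dp[i+L] is `tail.getD (L-1)` here.
def pvBuildB (ws : List (List Char)) (maxlen : Nat) (m : List (List Char × List String)) :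
    List Char → List (Nat × PVEntry)
  | [] =>
    (match pvLookA m [] with
     | some v => (v.length, PVEntry.memoE v)
     | none => (0, PVEntry.emptyE)) :: []
  | c :: rest =>
    let tail := pvBuildB ws maxlen m rest
    let t := c :: rest
    let e :=
      match pvLookA m t with
      | some v => (v.length, PVEntry.memoE v)
      | none =>
        let best := (PySem.List.pyRange 1 ((min t.length maxlen : Nat) + 1) 1).foldl
          (fun (b : Option (Nat × Nat)) L =>
            if PySem.List.slice t none (some L) ∈ ws then
              let c := 1 + (tail.getD (L.toNat - 1) (0, PVEntry.emptyE)).1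
              match b with
              | none => some (c, L.toNat - 1)
              | some bb => if c > bb.1 then some (c, L.toNat - 1) else some bb
            else b)
          none
        match best with
        | some bb => (bb.1, PVEntry.splitE bb.2)
        | none => (1, PVEntry.fallE)
    e :: tail

-- Source B's reconstruction loop (while True: … follow the split pointers).
def pvRecon (t : List Char) (dps : List (Nat × PVEntry)) : List String :=
  match dps with
  | [] => []
  | (_, e) :: rest =>
    match e with
    | PVEntry.memoE v => v
    | PVEntry.emptyE => []
    | PVEntry.fallE => [String.ofList t]
    | PVEntry.splitE kk => String.ofList (t.take (kk + 1)) :: pvRecon (t.drop (kk + 1)) (rest.drop kk)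
termination_by dps.length
decreasing_by simp

def segment_string_alt (s : String) (word_set : List String) (memo : List (String × List String)) : List String :=
  let t := s.toList
  let wsL := word_set.map String.toList
  let mL := memo.map (fun p => (p.1.toList, p.2))
  let maxlen := wsL.foldl (fun a w => max a w.length) 0   -- max(map(len, word_set), default=0)
  pvRecon t (pvBuildB wsL maxlen mL t)

-- ===== PRECONDITION & SPEC =====
def Spec_segment_string (s : String) (word_set : List String) (memo : List (String × List String)) (out : List String) : Prop := out = segment_string_alt s word_set memo
instance (s : String) (word_set : List String) (memo : List (String × List String)) (out : List String) : Decidable (Spec_segment_string s word_set memo out) := by unfold Spec_segment_string; infer_instance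

-- ===== CLAIM (what is proved, stated in full; the proofs are below) =====
def Claim_equal_segment_string : Prop := ∀ (s : String) (word_set : List String) (memo : List (String × List String)), Dom_segment_string s word_set memo → Spec_segment_string s word_set memo (segment_string s word_set memo)

-- ===== LEMMAS AND PROOFS =====

-- B's value for a suffix, as one function: the common yardstick of the proof.
def pvVal (ws : List (List Char)) (k : Nat) (m : List (List Char × List String)) (t : List Char) : List String :=
  pvRecon t (pvBuildB ws k m t)

lemma pvLookA_append (m : List (List Char × List String)) (p : List Char × List String) (u : List Char) :
    pvLookA (m ++ [p]) u =
      match pvLookA m u with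
      | some v => some v
      | none => if p.1 = u then some p.2 else none := by
  induction m with
  | nil => simp [pvLookA]
  | cons q r ih => by_cases h : q.1 = u <;> simp [pvLookA, h, ih]

lemma pvMaxlen_le (ws : List (List Char)) (w : List Char) (hw : w ∈ ws) :
    w.length ≤ ws.foldl (fun a x => max a x.length) 0 := by
  have h := (PySem.List.le_foldl_max (ws.map List.length) 0).2 w.length
    (List.mem_map_of_mem hw)
  simpa [List.foldl_map] using h

lemma pvBuildB_length (ws : List (List Char)) (k : Nat) (m : List (List Char × List String)) (t : List Char) :
    (pvBuildB ws k m t).length = t.length + 1 := by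
  induction t with
  | nil => simp [pvBuildB]
  | cons c rest ih => simp [pvBuildB, ih]

lemma pvBuildB_drop (ws : List (List Char)) (k : Nat) (m : List (List Char × List String)) :
    ∀ (j : Nat) (t : List Char), j ≤ t.length →
      (pvBuildB ws k m t).drop j = pvBuildB ws k m (t.drop j) := by
  intro j
  induction j with
  | zero => intro t _; simp
  | succ j ih =>
    intro t ht
    cases t with
    | nil => simp at ht
    | cons c rest =>
      show (pvBuildB ws k m (c :: rest)).drop (j+1) = _
      rw [pvBuildB]
      simpa using ih rest (by simpa using ht)

-- the inner best-choice fold of pvBuildB, as a named term for the proofs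
def pvBestB (ws : List (List Char)) (k : Nat) (m : List (List Char × List String))
    (c : Char) (rest : List Char) : Option (Nat × Nat) :=
  (PySem.List.pyRange 1 ((min (c :: rest).length k : Nat) + 1) 1).foldl
    (fun (b : Option (Nat × Nat)) L =>
      if PySem.List.slice (c :: rest) none (some L) ∈ ws then
        let cc := 1 + ((pvBuildB ws k m rest).getD (L.toNat - 1) (0, PVEntry.emptyE)).1
        match b with
        | none => some (cc, L.toNat - 1)
        | some bb => if cc > bb.1 then some (cc, L.toNat - 1) else some bb
      else b)
    none

lemma pvBuildB_cons (ws : List (List Char)) (k : Nat) (m : List (List Char × List String))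
    (c : Char) (rest : List Char) :
    pvBuildB ws k m (c :: rest) =
      (match pvLookA m (c :: rest) with
       | some v => (v.length, PVEntry.memoE v)
       | none =>
         match pvBestB ws k m c rest with
         | some bb => (bb.1, PVEntry.splitE bb.2)
         | none => (1, PVEntry.fallE)) :: pvBuildB ws k m rest := by
  rfl

-- post-condition of Source B's inner loop: any chosen (count, pointer) has the stated shape
lemma pvBestQ (ws : List (List Char)) (k : Nat) (m : List (List Char × List String))
    (c : Char) (rest : List Char) :
    pvBestB ws k m c rest = none ∨ ∃ kk : Nat, kk ≤ rest.length ∧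
      pvBestB ws k m c rest =
        some (1 + ((pvBuildB ws k m rest).getD kk (0, PVEntry.emptyE)).1, kk) := by
  unfold pvBestB
  refine List.foldlRecOn (motive := fun best => best = none ∨ ∃ kk : Nat, kk ≤ rest.length ∧
      best = some (1 + ((pvBuildB ws k m rest).getD kk (0, PVEntry.emptyE)).1, kk))
    _ _ (Or.inl rfl) ?_
  intro b hb L hL
  rw [PySem.List.mem_pyRange_one] at hL
  have hkk : L.toNat - 1 ≤ rest.length := by
    have h2 := hL.2
    have h3 : (min (c :: rest).length k : Nat) ≤ (c :: rest).length := Nat.min_le_left _ _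
    simp only [List.length_cons] at h3 h2
    omega
  by_cases hg : PySem.List.slice (c :: rest) none (some L) ∈ ws
  · simp only [hg, if_pos]
    rcases hb with rfl | ⟨kk, hkk', rfl⟩
    · exact Or.inr ⟨L.toNat - 1, hkk, rfl⟩
    · dsimp only
      split_ifs
      · exact Or.inr ⟨L.toNat - 1, hkk, rfl⟩
      · exact Or.inr ⟨kk, hkk', rfl⟩
  · simpa [hg] using hb

lemma pvVal_memo (ws : List (List Char)) (k : Nat) (m : List (List Char × List String))
    (t : List Char) (v : List String) (h : pvLookA m t = some v) : pvVal ws k m t = v := by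
  cases t <;> simp [pvVal, pvBuildB, h] <;> rw [pvRecon]

-- unfolding pvVal one step, in each of the four shapes
lemma pvVal_nil_none (ws : List (List Char)) (k : Nat) (m : List (List Char × List String))
    (h : pvLookA m [] = none) : pvVal ws k m [] = [] := by
  simp [pvVal, pvBuildB, h]
  rw [pvRecon]

lemma pvVal_fall (ws : List (List Char)) (k : Nat) (m : List (List Char × List String))
    (c : Char) (rest : List Char) (h : pvLookA m (c :: rest) = none)
    (hb : pvBestB ws k m c rest = none) :
    pvVal ws k m (c :: rest) = [String.ofList (c :: rest)] := by
  unfold pvVal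
  rw [pvBuildB_cons, h, hb]
  rw [pvRecon]

lemma pvVal_split (ws : List (List Char)) (k : Nat) (m : List (List Char × List String))
    (c : Char) (rest : List Char) (c0 kk : Nat) (h : pvLookA m (c :: rest) = none)
    (hb : pvBestB ws k m c rest = some (c0, kk)) (hkk : kk ≤ rest.length) :
    pvVal ws k m (c :: rest) =
      String.ofList ((c :: rest).take (kk + 1)) :: pvVal ws k m (rest.drop kk) := by
  unfold pvVal
  rw [pvBuildB_cons, h, hb]
  rw [pvRecon]
  rw [List.drop_succ_cons, pvBuildB_drop ws k m kk rest hkk]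

lemma pvGetD_headD_drop (l : List (Nat × PVEntry)) (j : Nat) (d : Nat × PVEntry) (hj : j < l.length) :
    l.getD j d = (l.drop j).headD d := by
  induction l generalizing j with
  | nil => simp at hj
  | cons x r ih =>
    cases j with
    | zero => simp
    | succ j =>
      have hj' : j < r.length := by simp at hj; omega
      simp only [List.getD_cons_succ, List.drop_succ_cons]
      exact ih j hj'

-- head count of the dp list = number of tokens in B's value
lemma pvCount (ws : List (List Char)) (k : Nat) (m : List (List Char × List String)) :
    ∀ (t : List Char), ((pvBuildB ws k m t).headD (0, PVEntry.emptyE)).1 = (pvVal ws k m t).length := by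
  intro t
  induction hn : t.length using Nat.strong_induction_on generalizing t with
  | _ n ih =>
  cases ht : pvLookA m t with
  | some v =>
    rw [pvVal_memo ws k m t v ht]
    cases t <;> simp [pvBuildB, ht]
  | none =>
    cases t with
    | nil => rw [pvVal_nil_none ws k m ht]; simp [pvBuildB, ht]
    | cons c rest =>
      rcases pvBestQ ws k m c rest with hb | ⟨kk, hkk, hb⟩
      · rw [pvVal_fall ws k m c rest ht hb, pvBuildB_cons, ht, hb]
        rfl
      · rw [pvVal_split ws k m c rest _ kk ht hb hkk, pvBuildB_cons, ht, hb]
        have hlt : kk < (pvBuildB ws k m rest).length := by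
          rw [pvBuildB_length]; omega
        have := ih (rest.drop kk).length
          (by simp only [List.length_cons] at hn; simp only [List.length_drop]; omega)
          (rest.drop kk) rfl
        rw [List.length_cons, pvGetD_headD_drop _ kk _ hlt,
            pvBuildB_drop ws k m kk rest hkk, this]
        simp
        omega

-- memo invariant of A's run, relative to the initial memo m0
def pvInv (ws : List (List Char)) (k : Nat) (m0 m : List (List Char × List String)) : Prop :=
  ∀ u, pvLookA m u = pvLookA m0 u ∨
       (pvLookA m0 u = none ∧ pvLookA m u = some (pvVal ws k m0 u))

-- the loop bodies of the two folds, named so the fold lemmas can speak about them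
def pvFA (ws : List (List Char)) (fuel' : Nat) (t : List Char) :
    (Option (List String) × List (List Char × List String)) → Int →
    (Option (List String) × List (List Char × List String)) :=
  fun st i =>
    let left := PySem.List.slice t none (some i)
    if left ∈ ws then
      let r := pvSegA ws fuel' (PySem.List.slice t (some i) none) st.2
      let cur := String.ofList left :: r.1
      (match st.1 with
       | none => some cur
       | some b => if cur.length > b.length then some cur else some b, r.2)
    else st

def pvFB (ws : List (List Char)) (tail : List (Nat × PVEntry)) (t : List Char) :
    Option (Nat × Nat) → Int → Option (Nat × Nat) :=
  fun b L =>
    if PySem.List.slice t none (some L) ∈ ws then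
      let cc := 1 + (tail.getD (L.toNat - 1) (0, PVEntry.emptyE)).1
      match b with
      | none => some (cc, L.toNat - 1)
      | some bb => if cc > bb.1 then some (cc, L.toNat - 1) else some bb
    else b

lemma pvSegA_succ_none (ws : List (List Char)) (fuel' : Nat) (t : List Char)
    (m : List (List Char × List String)) (hm : pvLookA m t = none) (htne : ¬ t = []) :
    pvSegA ws (fuel' + 1) t m =
      (let st := (PySem.List.pyRange 1 ((t.length : Int) + 1) 1).foldl (pvFA ws fuel' t) (none, m)
       let res := match st.1 with | some b => b | none => [String.ofList t]
       (res, st.2 ++ [(t, res)])) := by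
  rw [pvSegA, hm]
  simp only [if_neg htne]
  rfl

lemma pvBestB_foldFB (ws : List (List Char)) (k : Nat) (m : List (List Char × List String))
    (c : Char) (rest : List Char) :
    pvBestB ws k m c rest =
      (PySem.List.pyRange 1 ((min (c :: rest).length k : Nat) + 1) 1).foldl
        (pvFB ws (pvBuildB ws k m rest) (c :: rest)) none := rfl

-- indices past the longest word never pass the membership guard: A's loop tail is a no-op
lemma pvTailId (ws : List (List Char)) (k : Nat) (hk : ∀ w ∈ ws, w.length ≤ k)
    (fuel' : Nat) (t : List Char) :
    ∀ (L : List Int), (∀ i ∈ L, (k : Int) < i ∧ i ≤ (t.length : Int)) →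
    ∀ st, L.foldl (pvFA ws fuel' t) st = st := by
  intro L
  induction L with
  | nil => intro _ st; rfl
  | cons i L ih =>
    intro hb st
    have hi := hb i (by simp)
    have hg : PySem.List.slice t none (some i) ∉ ws := by
      intro hmem
      have hlen := hk _ hmem
      rw [PySem.List.slice_to t (by omega)] at hlen
      simp only [List.length_take] at hlen
      omega
    have : pvFA ws fuel' t st i = st := by
      simp only [pvFA]
      rw [if_neg hg]
    rw [List.foldl_cons, this]
    exact ih (fun j hj => hb j (by simp [hj])) st

-- state relation between A's loop (best candidate list) and B's loop (count + pointer)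
def pvRelAB (ws : List (List Char)) (k : Nat) (m0 : List (List Char × List String))
    (t : List Char) (bA : Option (List String)) (bB : Option (Nat × Nat)) : Prop :=
  (bA = none ∧ bB = none) ∨
  ∃ kk : Nat, kk + 1 ≤ t.length ∧
    bA = some (String.ofList (t.take (kk + 1)) :: pvVal ws k m0 (t.drop (kk + 1))) ∧
    bB = some ((String.ofList (t.take (kk + 1)) :: pvVal ws k m0 (t.drop (kk + 1))).length, kk)

-- the two loops run in lock-step over the same index list
lemma pvFoldRel (ws : List (List Char)) (k : Nat) (m0 : List (List Char × List String))
    (fuel' : Nat) (c : Char) (rest : List Char)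
    (hlen : (c :: rest).length ≤ fuel' + 1)
    (IH : ∀ u m', u.length ≤ fuel' → pvInv ws k m0 m' →
        (pvSegA ws fuel' u m').1 = pvVal ws k m0 u ∧ pvInv ws k m0 (pvSegA ws fuel' u m').2) :
    ∀ (L : List Int), (∀ i ∈ L, 1 ≤ i ∧ i ≤ ((c :: rest).length : Int)) →
    ∀ (bA : Option (List String)) (m : List (List Char × List String)) (bB : Option (Nat × Nat)),
      pvInv ws k m0 m → pvRelAB ws k m0 (c :: rest) bA bB →
      pvInv ws k m0 (L.foldl (pvFA ws fuel' (c :: rest)) (bA, m)).2 ∧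
      pvRelAB ws k m0 (c :: rest) (L.foldl (pvFA ws fuel' (c :: rest)) (bA, m)).1
        (L.foldl (pvFB ws (pvBuildB ws k m0 rest) (c :: rest)) bB) := by
  intro L
  induction L with
  | nil => intro _ bA m bB hInv hRel; exact ⟨hInv, hRel⟩
  | cons i L ihL =>
    intro hb bA m bB hInv hRel
    have hi := hb i (by simp)
    simp only [List.length_cons] at hi
    rw [List.foldl_cons, List.foldl_cons]
    by_cases hg : PySem.List.slice (c :: rest) none (some i) ∈ ws
    · -- the guard fires in both loops
      have hsuf : PySem.List.slice (c :: rest) (some i) none = (c :: rest).drop i.toNat :=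
        PySem.List.slice_from _ (by omega)
      have hslen : ((c :: rest).drop i.toNat).length ≤ fuel' := by
        simp only [List.length_drop, List.length_cons] at *
        omega
      obtain ⟨hr1, hr2⟩ := IH ((c :: rest).drop i.toNat) m hslen hInv
      -- the count B adds is exactly the length of A's candidate
      have hkk1 : i.toNat - 1 ≤ rest.length := by omega
      have hdropeq : rest.drop (i.toNat - 1) = (c :: rest).drop i.toNat := by
        conv_rhs => rw [show i.toNat = (i.toNat - 1) + 1 from by omega]
        rw [List.drop_succ_cons]
      have hcnt : ((pvBuildB ws k m0 rest).getD (i.toNat - 1) (0, PVEntry.emptyE)).1 =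
          (pvVal ws k m0 ((c :: rest).drop i.toNat)).length := by
        have hlt : i.toNat - 1 < (pvBuildB ws k m0 rest).length := by
          rw [pvBuildB_length]; omega
        rw [pvGetD_headD_drop _ _ _ hlt, pvBuildB_drop ws k m0 _ rest hkk1, hdropeq,
          pvCount]
      have htake : (c :: rest).take ((i.toNat - 1) + 1) = PySem.List.slice (c :: rest) none (some i) := by
        rw [PySem.List.slice_to (c :: rest) (by omega)]
        congr 1
        omega
      have hdrop2 : (c :: rest).drop ((i.toNat - 1) + 1) = (c :: rest).drop i.toNat := by
        congr 1
        omega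
      set cur := String.ofList (PySem.List.slice (c :: rest) none (some i)) ::
        pvVal ws k m0 ((c :: rest).drop i.toNat) with hcur
      have hA : pvFA ws fuel' (c :: rest) (bA, m) i =
          ((match bA with
            | none => some cur
            | some b => if cur.length > b.length then some cur else some b),
           (pvSegA ws fuel' ((c :: rest).drop i.toNat) m).2) := by
        simp only [pvFA]
        rw [if_pos hg, hsuf, hr1]
        cases bA <;> rfl
      have hB : pvFB ws (pvBuildB ws k m0 rest) (c :: rest) bB i =
          (match bB with
            | none => some (cur.length, i.toNat - 1)
            | some bb => if cur.length > bb.1 then some (cur.length, i.toNat - 1) else some bb) := by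
        simp only [pvFB]
        rw [if_pos hg, hcnt]
        have : 1 + (pvVal ws k m0 ((c :: rest).drop i.toNat)).length = cur.length := by
          simp [hcur]
          omega
        rw [this]
        cases bB <;> rfl
      rw [hA, hB]
      rcases hRel with ⟨rfl, rfl⟩ | ⟨kk, hkkle, rfl, rfl⟩
      · exact ihL (fun j hj => hb j (by simp [hj])) _ _ _ hr2
          (Or.inr ⟨i.toNat - 1, by simp only [List.length_cons]; omega,
            by rw [htake, hdrop2], by rw [htake, hdrop2]⟩)
      · dsimp only
        by_cases hcmp : cur.length >
            (String.ofList ((c :: rest).take (kk + 1)) :: pvVal ws k m0 ((c :: rest).drop (kk + 1))).length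
        · rw [if_pos hcmp, if_pos hcmp]
          exact ihL (fun j hj => hb j (by simp [hj])) _ _ _ hr2
            (Or.inr ⟨i.toNat - 1, by simp only [List.length_cons]; omega,
              by rw [htake, hdrop2], by rw [htake, hdrop2]⟩)
        · rw [if_neg hcmp, if_neg hcmp]
          exact ihL (fun j hj => hb j (by simp [hj])) _ _ _ hr2
            (Or.inr ⟨kk, hkkle, rfl, rfl⟩)
    · -- the guard fails in both loops
      have hA : pvFA ws fuel' (c :: rest) (bA, m) i = (bA, m) := by
        simp only [pvFA]; rw [if_neg hg]
      have hB : pvFB ws (pvBuildB ws k m0 rest) (c :: rest) bB i = bB := by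
        simp only [pvFB]; rw [if_neg hg]
      rw [hA, hB]
      exact ihL (fun j hj => hb j (by simp [hj])) _ _ _ hInv hRel

-- appending the freshly memoised entry preserves the invariant
lemma pvInv_append (ws : List (List Char)) (k : Nat)
    (m0 m' : List (List Char × List String)) (t : List Char)
    (hInv : pvInv ws k m0 m') :
    pvInv ws k m0 (m' ++ [(t, pvVal ws k m0 t)]) := by
  intro u
  rw [pvLookA_append]
  rcases hInv u with h | h
  · cases hcase : pvLookA m' u with
    | some v =>
      rw [hcase] at h
      exact Or.inl (by simpa using h)
    | none =>
      rw [hcase] at h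
      by_cases hu : t = u
      · subst hu
        exact Or.inr ⟨h.symm, by simp⟩
      · exact Or.inl (by simp [hu, ← h])
  · exact Or.inr ⟨h.1, by rw [h.2]⟩

-- entry cases of A shared between the fuel cases
lemma pvSegA_memo (ws : List (List Char)) (fuel : Nat) (t : List Char)
    (m : List (List Char × List String)) (v : List String) (hm : pvLookA m t = some v) :
    pvSegA ws fuel t m = (v, m) := by
  rw [pvSegA.eq_def, hm]

lemma pvSegA_nil_none (ws : List (List Char)) (fuel : Nat)
    (m : List (List Char × List String)) (hm : pvLookA m [] = none) :
    pvSegA ws fuel [] m = ([], m) := by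
  rw [pvSegA.eq_def, hm]
  simp

-- main lemma: A computes B's value and preserves the invariant
lemma pvMainA (ws : List (List Char)) (k : Nat) (hk : ∀ w ∈ ws, w.length ≤ k)
    (m0 : List (List Char × List String)) :
    ∀ (fuel : Nat) (t : List Char) (m : List (List Char × List String)),
      t.length ≤ fuel → pvInv ws k m0 m →
      (pvSegA ws fuel t m).1 = pvVal ws k m0 t ∧ pvInv ws k m0 (pvSegA ws fuel t m).2 := by
  have memoCase : ∀ (fuel : Nat) (t : List Char) (m : List (List Char × List String)) (v : List String),
      pvInv ws k m0 m → pvLookA m t = some v →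
      (pvSegA ws fuel t m).1 = pvVal ws k m0 t ∧ pvInv ws k m0 (pvSegA ws fuel t m).2 := by
    intro fuel t m v hInv hm
    rw [pvSegA_memo ws fuel t m v hm]
    refine ⟨?_, hInv⟩
    rcases hInv t with h | h
    · rw [hm] at h
      exact (pvVal_memo ws k m0 t v h.symm).symm
    · rw [hm] at h
      exact Option.some.inj h.2
  have noneNone : ∀ (m : List (List Char × List String)) (t : List Char),
      pvInv ws k m0 m → pvLookA m t = none → pvLookA m0 t = none := by
    intro m t hInv hm
    rcases hInv t with h | h
    · rw [← h]; exact hm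
    · rw [hm] at h; exact absurd h.2 (by simp)
  intro fuel
  induction fuel with
  | zero =>
    intro t m hlen hInv
    have ht : t = [] := by cases t with | nil => rfl | cons a b => simp at hlen
    subst ht
    cases hm : pvLookA m [] with
    | some v => exact memoCase 0 [] m v hInv hm
    | none =>
      rw [pvSegA_nil_none ws 0 m hm]
      exact ⟨(pvVal_nil_none ws k m0 (noneNone m [] hInv hm)).symm, hInv⟩
  | succ fuel' IH =>
    intro t m hlen hInv
    cases hm : pvLookA m t with
    | some v => exact memoCase (fuel' + 1) t m v hInv hm
    | none =>
      have hm0 : pvLookA m0 t = none := noneNone m t hInv hm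
      by_cases htnil : t = []
      · subst htnil
        rw [pvSegA_nil_none ws (fuel' + 1) m hm]
        exact ⟨(pvVal_nil_none ws k m0 hm0).symm, hInv⟩
      · obtain ⟨c, rest, rfl⟩ := List.exists_cons_of_ne_nil htnil
        rw [pvSegA_succ_none ws fuel' _ m hm htnil]
        have hNle : min (c :: rest).length k ≤ (c :: rest).length := Nat.min_le_left _ _
        have hsplit := PySem.List.pyRange_one_append 1 ((min (c :: rest).length k : Nat) + 1)
          (((c :: rest).length : Int) + 1) (by push_cast; omega) (by push_cast; omega)
        rw [hsplit, List.foldl_append]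
        have hrel := pvFoldRel ws k m0 fuel' c rest hlen IH
          (PySem.List.pyRange 1 ((min (c :: rest).length k : Nat) + 1) 1)
          (by
            intro i hi
            rw [PySem.List.mem_pyRange_one] at hi
            constructor
            · omega
            · have : ((min (c :: rest).length k : Nat) : Int) ≤ ((c :: rest).length : Int) := by
                exact_mod_cast hNle
              omega)
          none m none hInv (Or.inl ⟨rfl, rfl⟩)
        rw [pvTailId ws k hk fuel' (c :: rest)
          (PySem.List.pyRange ((min (c :: rest).length k : Nat) + 1) (((c :: rest).length : Int) + 1) 1)
          (by
            intro i hi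
            rw [PySem.List.mem_pyRange_one] at hi
            have hmc := min_choice (c :: rest).length k
            constructor
            · rcases hmc with h | h <;> rw [h] at hi <;> omega
            · omega) _]
        obtain ⟨hInv', hRel⟩ := hrel
        rcases hRel with ⟨hA1, hB1⟩ | ⟨kk, hkkle, hA1, hB1⟩
        · have hbest : pvBestB ws k m0 c rest = none := by
            rw [pvBestB_foldFB]; exact hB1
          have hval := pvVal_fall ws k m0 c rest hm0 hbest
          simp only [hA1]
          exact ⟨hval.symm, by rw [← hval]; exact pvInv_append ws k m0 _ (c :: rest) hInv'⟩
        · have hbest : pvBestB ws k m0 c rest =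
              some ((String.ofList ((c :: rest).take (kk + 1)) ::
                pvVal ws k m0 ((c :: rest).drop (kk + 1))).length, kk) := by
            rw [pvBestB_foldFB]; exact hB1
          have hkk2 : kk ≤ rest.length := by
            simp only [List.length_cons] at hkkle; omega
          have hval := pvVal_split ws k m0 c rest _ kk hm0 hbest hkk2
          rw [List.drop_succ_cons] at hA1
          simp only [hA1]
          exact ⟨hval.symm, by rw [← hval]; exact pvInv_append ws k m0 _ (c :: rest) hInv'⟩
-- ===== VERDICT (by name: the statement is the Claim_ definition above) =====
theorem segment_string_spec : Claim_equal_segment_string := by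
  intro s word_set memo _
  unfold Spec_segment_string segment_string segment_string_alt
  have h := pvMainA (word_set.map String.toList)
      ((word_set.map String.toList).foldl (fun a w => max a w.length) 0)
      (fun w hw => pvMaxlen_le _ w hw)
      (memo.map (fun p => (p.1.toList, p.2)))
      s.toList.length s.toList (memo.map (fun p => (p.1.toList, p.2)))
      le_rfl (fun u => Or.inl rfl)
  exact h.1
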